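-- pv_equiv track=rewrite | github.com/benjamindimant/information-theory | ud.py | cross_prefix
-- ===== SOURCE A (Python) =====
-- def remove_prefix(prefix, S):
--     ''' Remove prefix from S.'''
--     return S[len(prefix):]
--
-- def find_prefix(prefix, L):
--     ''' Return the dangling suffixes of each matching string.'''
--     dangling = []
--     for l in L:
--         if l.startswith(prefix):
--             dangling.append(remove_prefix(prefix, l))
--     return set(dangling)
--
-- def cross_prefix(L1, L2):
--     ''' Return the dangling suffixes between 2 lists. '''
--     L1L2 = set()
--     for l1 in L1:
--         L1L2 |= find_prefix(l1, L2)
--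
--     L2L1 = set()
--     for l2 in L2:
--         L2L1 |= find_prefix(l2, L1)
--     return L1L2 | L2L1
-- ===== SOURCE B (Python) =====
-- def cross_prefix(L1, L2):
--     ''' Return the dangling suffixes between 2 lists. '''
--     def prefix_map(L):
--         # map every prefix of every string in L to the list of matching suffixes
--         d = {}
--         for s in L:
--             for k in range(len(s) + 1):
--                 d.setdefault(s[:k], []).append(s[k:])
--         return d
--     suf2 = prefix_map(L2)
--     suf1 = prefix_map(L1)
--     out = set()
--     for l1 in L1:
--         out |= set(suf2.get(l1, []))
--     for l2 in L2:
--         out |= set(suf1.get(l2, []))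
--     return out
-- ===== Notes on version B (the rewrite author's own statement) =====
-- stated objective: faster
-- what changed: Instead of scanning the whole other list with startswith once per string (nested loops), B builds for each list a single hash map from every prefix of every string to the list of its matching suffixes, and then answers each string of the other list with one dict lookup.
import Mathlib
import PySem

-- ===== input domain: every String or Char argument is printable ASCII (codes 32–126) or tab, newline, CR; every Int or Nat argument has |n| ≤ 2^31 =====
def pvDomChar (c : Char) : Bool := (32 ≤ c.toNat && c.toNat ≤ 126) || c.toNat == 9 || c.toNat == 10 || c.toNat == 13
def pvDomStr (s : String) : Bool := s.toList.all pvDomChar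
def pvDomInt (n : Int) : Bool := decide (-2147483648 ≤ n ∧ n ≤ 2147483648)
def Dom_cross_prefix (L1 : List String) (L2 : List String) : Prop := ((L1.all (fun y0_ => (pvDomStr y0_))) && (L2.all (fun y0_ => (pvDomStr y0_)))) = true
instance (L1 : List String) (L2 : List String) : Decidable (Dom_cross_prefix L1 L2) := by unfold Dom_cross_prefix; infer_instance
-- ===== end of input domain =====

-- B replaces A's per-string scan of the other list by a prefix→suffixes hash map built once per list (faster; asymptotic).

-- ===== PORT A =====
def remove_prefix (pre S : String) : String :=
  PySem.Str.slice S (some (PySem.Str.len pre)) none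

def find_prefix (pre : String) (L : List String) : List String :=
  PySem.Set.ofList (L.foldl (fun dangling l =>
    if PySem.Str.startswith l pre then dangling ++ [remove_prefix pre l] else dangling) [])

def cross_prefix (L1 : List String) (L2 : List String) : List String :=
  let L1L2 := L1.foldl (fun s l1 => PySem.Set.union s (find_prefix l1 L2)) PySem.Set.empty
  let L2L1 := L2.foldl (fun s l2 => PySem.Set.union s (find_prefix l2 L1)) PySem.Set.empty
  PySem.Set.union L1L2 L2L1

-- ===== PORT B =====
-- d.setdefault(s[:k], []).append(s[k:])  is  Dict.modify (s[:k]) [] (· ++ [s[k:]])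
def prefix_map (L : List String) : PySem.Dict String (List String) :=
  L.foldl (fun d s =>
    (PySem.List.pyRange 0 (PySem.Str.len s + 1) 1).foldl
      (fun d k => d.modify (PySem.Str.slice s none (some k)) []
        (· ++ [PySem.Str.slice s (some k) none])) d)
    PySem.Dict.empty

def cross_prefix_alt (L1 : List String) (L2 : List String) : List String :=
  let suf2 := prefix_map L2
  let suf1 := prefix_map L1
  let out1 := L1.foldl (fun s l1 => PySem.Set.union s (PySem.Set.ofList (suf2.getD l1 []))) PySem.Set.empty
  let out2 := L2.foldl (fun s l2 => PySem.Set.union s (PySem.Set.ofList (suf1.getD l2 []))) out1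
  out2

-- ===== PRECONDITION & SPEC =====
def Spec_cross_prefix (L1 : List String) (L2 : List String) (out : List String) : Prop := out = cross_prefix_alt L1 L2
instance (L1 : List String) (L2 : List String) (out : List String) : Decidable (Spec_cross_prefix L1 L2 out) := by unfold Spec_cross_prefix; infer_instance

-- ===== CLAIM (what is proved, stated in full; the proofs are below) =====
def Claim_equal_cross_prefix : Prop := ∀ (L1 : List String) (L2 : List String), Dom_cross_prefix L1 L2 → Spec_cross_prefix L1 L2 (cross_prefix L1 L2)

-- ===== LEMMAS AND PROOFS =====

-- the dangling-suffix list of p against L, with duplicates, in L's order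
def pvMatches (p : String) (L : List String) : List String :=
  (L.filter (fun l => PySem.Str.startswith l p)).map (fun l => remove_prefix p l)

lemma find_prefix_eq (p : String) (L : List String) :
    find_prefix p L = PySem.Set.ofList (pvMatches p L) := by
  unfold find_prefix pvMatches
  rw [PySem.List.foldl_append_if (fun l => PySem.Str.startswith l p) (fun l => remove_prefix p l)]
  rw [List.nil_append]

lemma union_ofList (s : PySem.Set String) (xs : List String) :
    PySem.Set.union s (PySem.Set.ofList xs) = PySem.Set.update s xs := by
  unfold PySem.Set.union
  rw [PySem.Set.update_eq_append_filter, PySem.Set.update_eq_append_filter,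
    PySem.Set.ofList_ofList]

lemma foldl_update_eq (g : String → List String) (L : List String) (s : PySem.Set String) :
    L.foldl (fun s x => PySem.Set.update s (g x)) s = PySem.Set.update s (L.flatMap g) := by
  induction L generalizing s with
  | nil => simp [PySem.Set.update_nil]
  | cons a t ih => simp [List.foldl_cons, ih, List.flatMap_cons, PySem.Set.update_append]

-- filter of a range by a predicate that holds (inside the range) at exactly one point
lemma range_filter_single (q : Nat → Bool) (k0 m : Nat) (h : ∀ k < m, (q k = true ↔ k = k0)) :
    (List.range m).filter q = if k0 < m then [k0] else [] := by
  induction m with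
  | zero => simp
  | succ m ih =>
    rw [List.range_succ, List.filter_append, ih (fun k hk => h k (by omega))]
    by_cases hm : m = k0
    · subst hm
      have hqm : q m = true := (h m (by omega)).mpr rfl
      simp [hqm]
    · have hqm : q m = false := by
        cases hqm : q m
        · rfl
        · exact absurd ((h m (by omega)).mp hqm) hm
      rw [List.filter_cons_of_neg (by simp [hqm]), List.filter_nil, List.append_nil]
      split_ifs with h1 h2 h2 <;> first | rfl | omega
    
lemma take_eq_iff (sl pl : List Char) (k : Nat) (hk : k ≤ sl.length) :
    sl.take k = pl ↔ (pl <+: sl ∧ k = pl.length) := by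
  constructor
  · rintro rfl
    exact ⟨List.take_prefix k sl, by simp [hk]⟩
  · rintro ⟨hp, rfl⟩
    exact (List.prefix_iff_eq_take.mp hp).symm

lemma inner_getD (s : String) (d : PySem.Dict String (List String)) (p : String) :
    ((PySem.List.pyRange 0 (PySem.Str.len s + 1) 1).foldl
      (fun d k => d.modify (PySem.Str.slice s none (some k)) []
        (· ++ [PySem.Str.slice s (some k) none])) d).getD p []
    = d.getD p [] ++ (if PySem.Str.startswith s p then [remove_prefix p s] else []) := by
  have hfold :
      (PySem.List.pyRange 0 (PySem.Str.len s + 1) 1).foldl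
        (fun d k => d.modify (PySem.Str.slice s none (some k)) []
          (· ++ [PySem.Str.slice s (some k) none])) d
      = ((PySem.List.pyRange 0 (PySem.Str.len s + 1) 1).map
          (fun k => (PySem.Str.slice s none (some k), PySem.Str.slice s (some k) none))).foldl
          (fun d p => d.modify p.1 [] (· ++ [p.2])) d := by
    rw [List.foldl_map]
  rw [hfold, PySem.Dict.getD_foldl_modify_append]
  congr 1
  have h1 : (PySem.Str.len s + 1 - 0).toNat = s.toList.length + 1 := by
    simp only [PySem.Str.len, sub_zero]
    omega
  rw [PySem.List.pyRange_one, h1]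
  simp only [zero_add]
  rw [List.map_map, List.filter_map, List.map_map]
  have hslice : ∀ k : Nat, (PySem.Str.slice s none (some (k : Int))).toList = s.toList.take k := by
    intro k
    simp [PySem.Str.toList_slice, PySem.List.slice_to_natCast]
  by_cases hpre : p.toList <+: s.toList
  · have hsw : PySem.Str.startswith s p = true := by
      simp only [PySem.Str.startswith_eq]
      exact (PySem.Chars.startswith_iff _ _).mpr hpre
    have hlen : p.toList.length ≤ s.toList.length := hpre.length_le
    have hq : ∀ k, k < s.toList.length + 1 →
        ((((fun q => q.1 == p) ∘ ((fun k => (PySem.Str.slice s none (some k),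
          PySem.Str.slice s (some k) none)) ∘ (fun (k : Nat) => (k : Int)))) k = true)
          ↔ k = p.toList.length) := by
      intro k hk
      simp only [Function.comp_apply, beq_iff_eq]
      rw [← String.toList_inj, hslice, take_eq_iff _ _ _ (by omega)]
      constructor
      · rintro ⟨-, h⟩; omega
      · intro h; exact ⟨hpre, h⟩
    rw [range_filter_single _ p.toList.length (s.toList.length + 1) hq]
    rw [if_pos (by omega), if_pos hsw]
    simp only [List.map_cons, List.map_nil, Function.comp_apply]
    rfl
  · have hsw : ¬ (PySem.Str.startswith s p = true) := by
      simp only [PySem.Str.startswith_eq]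
      intro ht
      exact hpre ((PySem.Chars.startswith_iff _ _).mp ht)
    have hnil : ((List.range (s.toList.length + 1)).filter
        (((fun q => q.1 == p) ∘ ((fun k => (PySem.Str.slice s none (some k),
          PySem.Str.slice s (some k) none)) ∘ (fun (k : Nat) => (k : Int)))))) = [] :=
      List.filter_eq_nil_iff.mpr (by
        intro k _
        simp only [Function.comp_apply, beq_iff_eq]
        intro hEq
        apply hpre
        rw [← String.toList_inj, hslice] at hEq
        rw [← hEq]
        exact List.take_prefix _ _)
    rw [hnil, if_neg hsw]
    rfl

lemma prefix_map_getD (L : List String) (p : String) :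
    (prefix_map L).getD p []
    = L.flatMap (fun s => if PySem.Str.startswith s p then [remove_prefix p s] else []) := by
  unfold prefix_map
  suffices h : ∀ d : PySem.Dict String (List String),
      (L.foldl (fun d s =>
        (PySem.List.pyRange 0 (PySem.Str.len s + 1) 1).foldl
          (fun d k => d.modify (PySem.Str.slice s none (some k)) []
            (· ++ [PySem.Str.slice s (some k) none])) d) d).getD p []
      = d.getD p [] ++ L.flatMap (fun s => if PySem.Str.startswith s p then [remove_prefix p s] else []) by
    rw [h]; simp [PySem.Dict.getD_empty]
  induction L with
  | nil => simp
  | cons a t ih =>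
    intro d
    rw [List.foldl_cons, ih, inner_getD, List.flatMap_cons, List.append_assoc]

lemma matches_eq_flatMap (p : String) (L : List String) :
    pvMatches p L = L.flatMap (fun s => if PySem.Str.startswith s p then [remove_prefix p s] else []) := by
  induction L with
  | nil => rfl
  | cons a t ih =>
    unfold pvMatches
    rw [List.filter_cons, List.flatMap_cons]
    by_cases h : PySem.Str.startswith a p = true
    · rw [if_pos h, if_pos h, List.map_cons, List.singleton_append]
      exact congrArg (remove_prefix p a :: ·) ih
    · rw [if_neg h, if_neg h, List.nil_append]
      exact ih

lemma prefix_map_getD_matches (L : List String) (p : String) :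
    (prefix_map L).getD p [] = pvMatches p L := by
  rw [prefix_map_getD, matches_eq_flatMap]

-- ===== VERDICT (by name: the statement is the Claim_ definition above) =====
theorem cross_prefix_spec : Claim_equal_cross_prefix := by
  intro L1 L2 _
  show cross_prefix L1 L2 = cross_prefix_alt L1 L2
  have e1 : cross_prefix L1 L2 = PySem.Set.union
      (L1.foldl (fun s l1 => PySem.Set.union s (find_prefix l1 L2)) PySem.Set.empty)
      (L2.foldl (fun s l2 => PySem.Set.union s (find_prefix l2 L1)) PySem.Set.empty) := rfl
  have e2 : cross_prefix_alt L1 L2 =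
      L2.foldl (fun s l2 => PySem.Set.union s (PySem.Set.ofList ((prefix_map L1).getD l2 [])))
        (L1.foldl (fun s l1 => PySem.Set.union s (PySem.Set.ofList ((prefix_map L2).getD l1 [])))
          PySem.Set.empty) := rfl
  have hA1 : ∀ (L M : List String) (s : PySem.Set String),
      L.foldl (fun s l => PySem.Set.union s (find_prefix l M)) s
      = PySem.Set.update s (L.flatMap (fun l => pvMatches l M)) := by
    intro L M s
    calc L.foldl (fun s l => PySem.Set.union s (find_prefix l M)) s
        = L.foldl (fun s l => PySem.Set.update s (pvMatches l M)) s := by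
          congr 1; funext s l; rw [find_prefix_eq, union_ofList]
      _ = PySem.Set.update s (L.flatMap (fun l => pvMatches l M)) := foldl_update_eq _ L s
  have hB1 : ∀ (L M : List String) (s : PySem.Set String),
      L.foldl (fun s l => PySem.Set.union s (PySem.Set.ofList ((prefix_map M).getD l []))) s
      = PySem.Set.update s (L.flatMap (fun l => pvMatches l M)) := by
    intro L M s
    calc L.foldl (fun s l => PySem.Set.union s (PySem.Set.ofList ((prefix_map M).getD l []))) s
        = L.foldl (fun s l => PySem.Set.update s (pvMatches l M)) s := by
          congr 1; funext s l; rw [prefix_map_getD_matches, union_ofList]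
      _ = PySem.Set.update s (L.flatMap (fun l => pvMatches l M)) := foldl_update_eq _ L s
  rw [e1, e2, hA1, hA1, hB1, hB1]
  have h0 : ∀ xs : List String, PySem.Set.update (PySem.Set.empty : PySem.Set String) xs
      = PySem.Set.ofList xs := fun xs => PySem.Set.update_empty xs
  rw [h0, h0, union_ofList]
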